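-- pv_equiv track=rewrite | github.com/ElCholoGamer/icc-proyecto-2 | image_utils.py | target_average
-- ===== SOURCE A (Python) =====
-- import math
--
-- def target_average(data_zip: list[tuple[list[list[int]], list[int], int]], target: int) -> list[list[int]]:
--     image_rows = len(data_zip[0][0])
--     image_cols = len(data_zip[0][0][0])
--     result = [[0] * image_cols for _ in range(0, image_rows)]
--
--     count = 0
--
--     for image, _, image_target in data_zip:
--         if image_target != target:
--             continue
--
--         for i in range(0, image_rows):
--             for j in range(0, image_cols):
--                 result[i][j] += image[i][j]
--
--         count += 1
--
--     return [[math.floor(pixel / count) for pixel in row] for row in result]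
-- ===== SOURCE B (Python) =====
-- import math
--
-- def target_average(data_zip: list[tuple[list[list[int]], list[int], int]], target: int) -> list[list[int]]:
--     image_rows = len(data_zip[0][0])
--     image_cols = len(data_zip[0][0][0])
--     matches = [image for image, _, image_target in data_zip if image_target == target]
--     count = len(matches)
--     return [[math.floor(sum(m[i][j] for m in matches) / count) for j in range(image_cols)]
--             for i in range(image_rows)]
-- ===== Notes on version B (the rewrite author's own statement) =====
-- stated objective: simpler
-- what changed: Filters the matching images once and builds the result with a pixel-outer comprehension that sums across matches, instead of an image-outer pass mutating a preallocated accumulator grid.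
import Mathlib
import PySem

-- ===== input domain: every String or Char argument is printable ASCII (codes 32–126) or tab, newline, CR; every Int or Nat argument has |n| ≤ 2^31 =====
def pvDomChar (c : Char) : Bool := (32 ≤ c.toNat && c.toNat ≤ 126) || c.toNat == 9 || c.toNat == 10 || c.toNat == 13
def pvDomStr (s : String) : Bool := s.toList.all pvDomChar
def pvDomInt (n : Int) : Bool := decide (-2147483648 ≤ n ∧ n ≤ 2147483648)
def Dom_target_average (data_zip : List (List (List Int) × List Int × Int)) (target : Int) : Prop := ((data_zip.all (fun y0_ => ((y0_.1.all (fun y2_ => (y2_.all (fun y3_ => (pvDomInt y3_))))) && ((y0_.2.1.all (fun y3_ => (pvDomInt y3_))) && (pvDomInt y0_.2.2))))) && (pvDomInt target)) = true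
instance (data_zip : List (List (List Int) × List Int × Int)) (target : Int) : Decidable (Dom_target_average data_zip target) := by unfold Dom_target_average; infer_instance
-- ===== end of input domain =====

-- B filters the matching images once and builds the result with a pixel-outer
-- comprehension summing across matches, instead of A's image-outer pass mutating
-- a preallocated accumulator grid (objective: simpler; same cost).

-- ===== PORT A =====
-- the nested `for i … for j …: result[i][j] += image[i][j]` loops of A
def pvAddImage (res : List (List Int)) (img : List (List Int)) (rows cols : Nat) : List (List Int) :=
  (List.range rows).foldl (fun res i =>
    (List.range cols).foldl (fun res j =>
      res.set i ((res.getD i []).set j (((res.getD i []).getD j 0) + ((img.getD i []).getD j 0)))) res) res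

def target_average (data_zip : List (List (List Int) × List Int × Int)) (target : Int) : List (List Int) :=
  let image_rows := ((data_zip.headD ([], [], 0)).1).length
  let image_cols := (((data_zip.headD ([], [], 0)).1).headD []).length
  let st := data_zip.foldl (fun (st : List (List Int) × Int) e =>
      if e.2.2 ≠ target then st
      else (pvAddImage st.1 e.1 image_rows image_cols, st.2 + 1))
    (List.replicate image_rows (List.replicate image_cols 0), (0 : Int))
  st.1.map (fun row => row.map (fun pixel => PySem.Int.floordiv pixel st.2))

-- ===== PORT B =====
def target_average_alt (data_zip : List (List (List Int) × List Int × Int)) (target : Int) : List (List Int) :=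
  let image_rows := ((data_zip.headD ([], [], 0)).1).length
  let image_cols := (((data_zip.headD ([], [], 0)).1).headD []).length
  let ms := (data_zip.filter (fun e => e.2.2 == target)).map (fun e => e.1)
  let count : Int := ms.length
  (List.range image_rows).map (fun i =>
    (List.range image_cols).map (fun j =>
      PySem.Int.floordiv (ms.foldl (fun s m => s + ((m.getD i []).getD j 0)) 0) count))

-- ===== PRECONDITION & SPEC =====
-- Pre_ excludes exactly the inputs where A raises: empty data_zip or a first image with
-- no rows (IndexError probing the dimensions), a matching image too small for the probed
-- dimensions (IndexError), and no matching image while there is at least one pixel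
-- (ZeroDivisionError).
def Pre_target_average (data_zip : List (List (List Int) × List Int × Int)) (target : Int) : Prop :=
  data_zip ≠ [] ∧
  (data_zip.headD ([], [], 0)).1 ≠ [] ∧
  (((data_zip.headD ([], [], 0)).1.headD []).length ≠ 0 → ∃ e ∈ data_zip, e.2.2 = target) ∧
  ∀ e ∈ data_zip, e.2.2 = target →
    (data_zip.headD ([], [], 0)).1.length ≤ e.1.length ∧
    ∀ row ∈ e.1.take (data_zip.headD ([], [], 0)).1.length,
      ((data_zip.headD ([], [], 0)).1.headD []).length ≤ row.length
instance (data_zip : List (List (List Int) × List Int × Int)) (target : Int) : Decidable (Pre_target_average data_zip target) := by unfold Pre_target_average; infer_instance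

def pvWitness_target_average : (List (List (List Int) × List Int × Int)) × Int :=
  ([([[1, 2], [3, 4]], [], 0), ([[5, 6], [7, 8]], [], 1)], 0)

def Spec_target_average (data_zip : List (List (List Int) × List Int × Int)) (target : Int) (out : List (List Int)) : Prop := out = target_average_alt data_zip target
instance (data_zip : List (List (List Int) × List Int × Int)) (target : Int) (out : List (List Int)) : Decidable (Spec_target_average data_zip target out) := by unfold Spec_target_average; infer_instance

-- ===== CLAIM (what is proved, stated in full; the proofs are below) =====
def Claim_equal_target_average : Prop := ∀ (data_zip : List (List (List Int) × List Int × Int)) (target : Int), Dom_target_average data_zip target → Pre_target_average data_zip target → Spec_target_average data_zip target (target_average data_zip target)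

-- ===== LEMMAS AND PROOFS =====

def rRow (c : Nat) (f : Nat → Int) : List Int := (List.range c).map f
def rGrid (r c : Nat) (g : Nat → Nat → Int) : List (List Int) := (List.range r).map (fun i => rRow c (g i))

theorem rRow_congr (c : Nat) (f g : Nat → Int) (h : ∀ j < c, f j = g j) : rRow c f = rRow c g := by
  unfold rRow
  exact List.map_congr_left (fun j hj => h j (List.mem_range.mp hj))

theorem rGrid_congr (r c : Nat) (f g : Nat → Nat → Int) (h : ∀ i < r, ∀ j < c, f i j = g i j) :
    rGrid r c f = rGrid r c g := by
  unfold rGrid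
  exact List.map_congr_left (fun i hi => rRow_congr c _ _ (h i (List.mem_range.mp hi)))

theorem length_rRow (c : Nat) (f : Nat → Int) : (rRow c f).length = c := by
  simp [rRow]

theorem length_rGrid (r c : Nat) (g : Nat → Nat → Int) : (rGrid r c g).length = r := by
  simp [rGrid]

theorem getD_rRow (c : Nat) (f : Nat → Int) (j : Nat) (hj : j < c) (d : Int) :
    (rRow c f).getD j d = f j := by
  rw [List.getD_eq_getElem _ d (by simpa [length_rRow] using hj)]
  simp [rRow]

theorem getD_rGrid (r c : Nat) (g : Nat → Nat → Int) (i : Nat) (hi : i < r) :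
    (rGrid r c g).getD i [] = rRow c (g i) := by
  rw [List.getD_eq_getElem _ [] (by simpa [length_rGrid] using hi)]
  simp [rGrid]

theorem set_rRow (c : Nat) (f : Nat → Int) (n : Nat) (_hn : n < c) (v : Int) :
    (rRow c f).set n v = rRow c (fun j => if j = n then v else f j) := by
  apply List.ext_getElem
  · simp [rRow]
  · intro i h1 h2
    simp only [rRow, List.getElem_set, List.getElem_map, List.getElem_range]
    rcases eq_or_ne n i with h | h
    · subst h; simp
    · simp [h, Ne.symm h]

theorem set_rGrid (r c : Nat) (g : Nat → Nat → Int) (n : Nat) (_hn : n < r) (h : Nat → Int) :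
    (rGrid r c g).set n (rRow c h) = rGrid r c (fun i => if i = n then h else g i) := by
  apply List.ext_getElem
  · simp [rGrid]
  · intro i h1 h2
    simp only [rGrid, List.getElem_set, List.getElem_map, List.getElem_range]
    rcases eq_or_ne n i with hcase | hcase
    · subst hcase; simp
    · simp [hcase, Ne.symm hcase]

-- the inner `for j in range(cols)` loop of A updates row i pointwise
theorem inner_fold (c : Nat) (a : Nat → Int) (i : Nat) (n : Nat) (_hn : n ≤ c) :
    ∀ (res : List (List Int)) (f : Nat → Int), i < res.length → res.getD i [] = rRow c f →
    (List.range n).foldl (fun res j =>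
        res.set i ((res.getD i []).set j (((res.getD i []).getD j 0) + a j))) res
      = res.set i (rRow c (fun j => if j < n then f j + a j else f j)) := by
  induction n with
  | zero =>
    intro res f hi hrow
    simp only [List.range_zero, List.foldl_nil]
    have : rRow c (fun j => if j < 0 then f j + a j else f j) = res.getD i [] := by
      rw [hrow]; exact rRow_congr c _ _ (by intro j hj; simp)
    rw [this, List.getD_eq_getElem _ [] hi, List.set_getElem_self]
  | succ n ih =>
    intro res f hi hrow
    rw [List.range_succ, List.foldl_append, ih (by omega) res f hi hrow]
    simp only [List.foldl_cons, List.foldl_nil]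
    have hlen : i < (res.set i (rRow c (fun j => if j < n then f j + a j else f j))).length := by
      simpa using hi
    have hget : (res.set i (rRow c (fun j => if j < n then f j + a j else f j))).getD i []
        = rRow c (fun j => if j < n then f j + a j else f j) := by
      rw [List.getD_eq_getElem _ [] hlen, List.getElem_set_self]
    rw [hget, List.set_set, getD_rRow c _ n (by omega), set_rRow c _ n (by omega)]
    congr 1
    apply rRow_congr
    intro j hj
    by_cases h1 : j = n
    · simp [h1]
    · by_cases h2 : j < n <;> simp [h1, h2] <;> omega

-- the outer `for i in range(rows)` loop adds the image to the grid pointwise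
theorem outer_fold (r c : Nat) (a : Nat → Nat → Int) (n : Nat) (_hn : n ≤ r) :
    ∀ (g : Nat → Nat → Int),
    (List.range n).foldl (fun res i =>
        (List.range c).foldl (fun res j =>
          res.set i ((res.getD i []).set j (((res.getD i []).getD j 0) + a i j))) res)
      (rGrid r c g)
      = rGrid r c (fun i j => if i < n then g i j + a i j else g i j) := by
  induction n with
  | zero =>
    intro g
    simp only [List.range_zero, List.foldl_nil]
    exact (rGrid_congr r c _ _ (by intro i hi j hj; simp)).symm
  | succ n ih =>
    intro g
    rw [List.range_succ, List.foldl_append, ih (by omega)]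
    simp only [List.foldl_cons, List.foldl_nil]
    rw [inner_fold c (a n) n c le_rfl _ _ (by simpa [length_rGrid] using (by omega : n < r))
        (getD_rGrid r c _ n (by omega)),
      set_rGrid r c _ n (by omega)]
    apply rGrid_congr
    intro i hi j hj
    by_cases h1 : i = n
    · subst h1
      simp [hj]
    · by_cases h2 : i < n
      · simp [h1, h2, show i < n + 1 by omega]
      · simp [h1, h2, show ¬ i < n + 1 by omega]

theorem pvAddImage_rGrid (r c : Nat) (g : Nat → Nat → Int) (img : List (List Int)) :
    pvAddImage (rGrid r c g) img r c
      = rGrid r c (fun i j => g i j + ((img.getD i []).getD j 0)) := by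
  unfold pvAddImage
  rw [outer_fold r c (fun i j => (img.getD i []).getD j 0) r le_rfl g]
  exact rGrid_congr r c _ _ (by intro i hi j hj; simp [hi])

-- B's per-pixel sum over the filtered images
def pvSum (ms : List (List (List Int))) (i j : Nat) : Int :=
  ms.foldl (fun s m => s + ((m.getD i []).getD j 0)) 0

theorem pvSum_shift (ms : List (List (List Int))) (i j : Nat) (x : Int) :
    ms.foldl (fun s m => s + ((m.getD i []).getD j 0)) x = x + pvSum ms i j := by
  induction ms generalizing x with
  | nil => simp [pvSum]
  | cons m ms ih =>
    simp only [pvSum, List.foldl_cons] at *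
    rw [ih, ih ((0 : Int) + _)]
    ring

-- the whole image-accumulation fold of A, characterised by B's filtered sums
theorem zip_fold (r c : Nat) (target : Int) (dz : List (List (List Int) × List Int × Int)) :
    ∀ (g : Nat → Nat → Int) (cnt : Int),
    dz.foldl (fun (st : List (List Int) × Int) e =>
        if e.2.2 ≠ target then st else (pvAddImage st.1 e.1 r c, st.2 + 1))
      (rGrid r c g, cnt)
      = (rGrid r c (fun i j => g i j + pvSum ((dz.filter (fun e => e.2.2 == target)).map (fun e => e.1)) i j),
         cnt + ((dz.filter (fun e => e.2.2 == target)).length : Int)) := by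
  induction dz with
  | nil =>
    intro g cnt
    simp only [List.foldl_nil, List.filter_nil, List.map_nil, List.length_nil]
    refine Prod.ext ?_ (by simp)
    exact rGrid_congr r c _ _ (by intro i hi j hj; simp [pvSum])
  | cons e dz ih =>
    intro g cnt
    by_cases h : e.2.2 = target
    · simp only [List.foldl_cons, ne_eq, not_true_eq_false, if_false,
        List.filter_cons, beq_iff_eq, h, if_true, List.map_cons, List.length_cons]
      rw [pvAddImage_rGrid, ih]
      refine Prod.ext ?_ (by simp; ring)
      apply rGrid_congr
      intro i hi j hj
      simp only [pvSum, List.foldl_cons]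
      rw [pvSum_shift]
      ring_nf
      rw [pvSum_shift]
      ring
    · simp only [List.foldl_cons, ne_eq, not_false_eq_true, if_true,
        List.filter_cons, beq_iff_eq, h, if_false]
      rw [ih]

theorem replicate_rGrid (r c : Nat) :
    List.replicate r (List.replicate c (0 : Int)) = rGrid r c (fun _ _ => 0) := by
  apply List.ext_getElem
  · simp [rGrid]
  · intro i h1 h2
    simp only [List.getElem_replicate, rGrid, List.getElem_map]
    apply List.ext_getElem
    · simp [rRow]
    · intro j hj1 hj2
      simp [rRow]

theorem map_rGrid (r c : Nat) (g : Nat → Nat → Int) (f : Int → Int) :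
    (rGrid r c g).map (fun row => row.map f) = rGrid r c (fun i j => f (g i j)) := by
  simp [rGrid, rRow, List.map_map]

theorem ports_agree (data_zip : List (List (List Int) × List Int × Int)) (target : Int) :
    target_average data_zip target = target_average_alt data_zip target := by
  dsimp only [target_average, target_average_alt]
  rw [replicate_rGrid, zip_fold, map_rGrid]
  unfold rGrid rRow pvSum
  simp only [zero_add, List.length_map]

-- ===== VERDICT (by name: the statement is the Claim_ definition above) =====
theorem target_average_spec : Claim_equal_target_average := by
  intro data_zip target _ _
  unfold Spec_target_average
  exact ports_agree data_zip target
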